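-- pv_equiv track=rewrite | github.com/michaelmech/Pluribass | data_gen.py | _count_opponent_raises
-- ===== SOURCE A (Python) =====
-- from typing import List, Tuple, Dict, Any
-- from typing import List, Tuple, Dict, Any
-- from typing import Optional, Tuple, List, Dict
-- from typing import List, Dict
-- from typing import List, Tuple, Dict, Any
-- from typing import List, Tuple, Dict, Any, Optional
-- from typing import Optional, Tuple, List
--
-- def determine_phase(action_idx, actions):
--     board_card_actions = [i for i, a in enumerate(actions) if a.startswith('d db')]
--     if not board_card_actions:
--         return 'preflop'
--     elif action_idx < board_card_actions[0]:
--         return 'preflop'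
--     elif len(board_card_actions) == 1 or action_idx < board_card_actions[1]:
--         return 'flop'
--     elif len(board_card_actions) == 2 or action_idx < board_card_actions[2]:
--         return 'turn'
--     else:
--         return 'river'
--
-- def _count_opponent_raises(past: List[str], hero_tag: Optional[str], street: Optional[str] = None) -> int:
--     """
--     Count opponent raises (cbr) so far, optionally filtered to a street.
--     """
--     cnt = 0
--     for i, a in enumerate(past):
--         if not a.startswith("p"):
--             continue
--         if street is not None and determine_phase(i, past) != street:
--             continue
--         pid = a.split()[0]
--         if pid == hero_tag:
--             continue
--         parts = a.split()
--         if len(parts) >= 2 and parts[1] == "cbr":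
--             cnt += 1
--     return cnt
-- ===== SOURCE B (Python) =====
-- def _count_opponent_raises(past, hero_tag, street=None):
--     """Single pass: keep a running count of board-card deals to know the current
--     street, instead of rescanning the whole history for each action."""
--     names = ("preflop", "flop", "turn", "river")
--     k = 0
--     cnt = 0
--     for a in past:
--         if a.startswith("d db"):
--             k += 1
--         elif a.startswith("p"):
--             parts = a.split()
--             if (parts[0] != hero_tag and len(parts) >= 2 and parts[1] == "cbr"
--                     and (street is None or names[min(k, 3)] == street)):
--                 cnt += 1
--     return cnt
-- ===== Notes on version B (the rewrite author's own statement) =====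
-- stated objective: alternative
-- what changed: B makes a single pass that maintains a running count of board-card deals to derive each action's street incrementally, instead of A's per-action rescan of the whole history inside determine_phase.
import Mathlib
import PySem

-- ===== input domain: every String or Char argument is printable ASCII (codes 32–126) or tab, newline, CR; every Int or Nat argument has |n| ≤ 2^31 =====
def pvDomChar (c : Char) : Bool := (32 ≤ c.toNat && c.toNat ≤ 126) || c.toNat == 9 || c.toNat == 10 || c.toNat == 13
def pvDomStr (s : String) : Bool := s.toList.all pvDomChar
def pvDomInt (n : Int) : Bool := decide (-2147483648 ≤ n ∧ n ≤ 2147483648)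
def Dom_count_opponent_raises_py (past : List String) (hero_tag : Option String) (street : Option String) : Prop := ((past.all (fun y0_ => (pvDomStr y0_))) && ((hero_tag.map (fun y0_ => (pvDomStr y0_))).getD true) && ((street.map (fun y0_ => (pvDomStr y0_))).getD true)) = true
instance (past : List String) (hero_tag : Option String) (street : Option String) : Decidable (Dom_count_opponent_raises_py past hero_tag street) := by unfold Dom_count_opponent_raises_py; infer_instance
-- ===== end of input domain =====

-- B replaces A's per-action street recomputation by one pass with a running
-- board-deal counter (objective: alternative).

-- ===== PORT A =====
-- literal port of determine_phase
def determine_phase_py (action_idx : Int) (actions : List String) : String :=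
  let b : List Int :=
    ((PySem.List.enumerate actions).filter (fun p => PySem.Str.startswith p.2 "d db")).map (fun p => p.1)
  if b = [] then "preflop"
  else if action_idx < b.headD 0 then "preflop"
  else if b.length = 1 ∨ action_idx < b.getD 1 0 then "flop"
  else if b.length = 2 ∨ action_idx < b.getD 2 0 then "turn"
  else "river"

-- loop body of A (named helper; same steps as the Python loop body)
def pvAstep (hero_tag street : Option String) (past : List String) (cnt : Int) (ia : Int × String) : Int :=
  if ¬ (PySem.Str.startswith ia.2 "p") then cnt
  else if (match street with | some s => decide (determine_phase_py ia.1 past ≠ s) | none => false) = true then cnt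
  else
    -- a startswith "p", so a.split() is nonempty and the Python [0] cannot raise
    let pid := (PySem.Str.split₀ ia.2).headD ""
    if some pid = hero_tag then cnt
    else
      let parts := PySem.Str.split₀ ia.2
      if 2 ≤ parts.length ∧ parts.getD 1 "" = "cbr" then cnt + 1 else cnt

def count_opponent_raises_py (past : List String) (hero_tag : Option String) (street : Option String) : Int :=
  (PySem.List.enumerate past).foldl (pvAstep hero_tag street past) 0

-- ===== PORT B =====
-- loop body of B: state = (board-deal counter k, cnt)
def pvBstep (hero_tag street : Option String) (st : Nat × Int) (a : String) : Nat × Int :=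
  if PySem.Str.startswith a "d db" then (st.1 + 1, st.2)
  else if PySem.Str.startswith a "p" then
    let parts := PySem.Str.split₀ a
    if hero_tag ≠ some (parts.headD "") ∧ 2 ≤ parts.length ∧ parts.getD 1 "" = "cbr" ∧
        (street = none ∨ street = some (["preflop", "flop", "turn", "river"].getD (min st.1 3) ""))
    then (st.1, st.2 + 1) else st
  else st

def count_opponent_raises_py_alt (past : List String) (hero_tag : Option String) (street : Option String) : Int :=
  (past.foldl (pvBstep hero_tag street) ((0 : Nat), (0 : Int))).2

-- ===== PRECONDITION & SPEC =====
def Spec_count_opponent_raises_py (past : List String) (hero_tag : Option String) (street : Option String) (out : Int) : Prop := out = count_opponent_raises_py_alt past hero_tag street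
instance (past : List String) (hero_tag : Option String) (street : Option String) (out : Int) : Decidable (Spec_count_opponent_raises_py past hero_tag street out) := by unfold Spec_count_opponent_raises_py; infer_instance

-- ===== CLAIM (what is proved, stated in full; the proofs are below) =====
def Claim_equal_count_opponent_raises_py : Prop := ∀ (past : List String) (hero_tag : Option String) (street : Option String), Dom_count_opponent_raises_py past hero_tag street → Spec_count_opponent_raises_py past hero_tag street (count_opponent_raises_py past hero_tag street)

-- ===== LEMMAS AND PROOFS =====

def pvIsB (a : String) : Bool := PySem.Str.startswith a "d db"
def pvIsP (a : String) : Bool := PySem.Str.startswith a "p"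
def pvPhase (k : Nat) : String := ["preflop", "flop", "turn", "river"].getD k ""

-- index list of board-deal actions, starting from offset s
def pvB (s : Int) (l : List String) : List Int :=
  ((PySem.List.enumerate l s).filter (fun p => PySem.Str.startswith p.2 "d db")).map (fun p => p.1)

theorem pvB_nil (s : Int) : pvB s [] = [] := by
  simp [pvB, PySem.List.enumerate_nil]

theorem pvB_cons (s : Int) (a : String) (t : List String) :
    pvB s (a :: t) = (if pvIsB a then [s] else []) ++ pvB (s + 1) t := by
  simp only [pvB, pvIsB, PySem.List.enumerate_cons, List.filter_cons]
  by_cases h : PySem.Str.startswith a "d db" = true <;>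
    simp_all

theorem pvB_ge (s : Int) (l : List String) : ∀ x ∈ pvB s l, s ≤ x := by
  induction l generalizing s with
  | nil => simp [pvB_nil]
  | cons a t ih =>
    intro x hx
    rw [pvB_cons] at hx
    rcases List.mem_append.1 hx with h | h
    · split at h <;> simp_all
    · have := ih (s + 1) x h; omega

theorem pvB_sorted (s : Int) (l : List String) : (pvB s l).Pairwise (· < ·) := by
  induction l generalizing s with
  | nil => simp [pvB_nil]
  | cons a t ih =>
    rw [pvB_cons]
    split
    · simp only [List.singleton_append, List.pairwise_cons]
      exact ⟨fun x hx => by have := pvB_ge (s + 1) t x hx; omega, ih (s + 1)⟩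
    · simpa using ih (s + 1)

theorem pvB_countP (l : List String) : ∀ (s : Int) (m : Nat),
    (pvB s l).countP (fun x => decide (x < s + m)) = (l.take m).countP pvIsB := by
  induction l with
  | nil => intro s m; simp [pvB_nil]
  | cons a t ih =>
    intro s m
    cases m with
    | zero =>
      rw [List.take_zero, List.countP_nil, List.countP_eq_zero]
      intro x hx
      have := pvB_ge s (a :: t) x hx
      simp only [decide_eq_true_eq]
      push_cast
      omega
    | succ m =>
      rw [pvB_cons, List.countP_append, List.take_succ_cons, List.countP_cons]
      have h2 : (pvB (s + 1) t).countP (fun x => decide (x < s + ((m : Nat) + 1 : Nat))) =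
          (t.take m).countP pvIsB := by
        rw [← ih (s + 1) m]
        apply List.countP_congr
        intro x _
        simp only [decide_eq_true_eq]
        push_cast
        omega
      rw [h2]
      have hs : (decide (s < s + ((m : Nat) + 1 : Nat))) = true := by
        simp only [decide_eq_true_eq]; push_cast; omega
      by_cases hB : pvIsB a = true <;> simp [hB, hs] <;> omega

-- the branch cascade of determine_phase, on a sorted index list, is the capped count of indices ≤ i
theorem pvG (b : List Int) (i : Int) (hs : b.Pairwise (· < ·)) :
    (if b = [] then "preflop"
     else if i < b.headD 0 then "preflop"
     else if b.length = 1 ∨ i < b.getD 1 0 then "flop"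
     else if b.length = 2 ∨ i < b.getD 2 0 then "turn"
     else "river")
    = pvPhase (min (b.countP (fun x => decide (x ≤ i))) 3) := by
  match b with
  | [] => simp [pvPhase]
  | x :: t =>
    rw [List.pairwise_cons] at hs
    obtain ⟨hx, hst⟩ := hs
    by_cases hix : i < x
    · have h0 : ((x :: t).countP (fun x => decide (x ≤ i))) = 0 := by
        rw [List.countP_eq_zero]
        intro y hy
        simp only [List.mem_cons] at hy
        simp only [decide_eq_true_eq]
        rcases hy with rfl | hy
        · omega
        · have := hx y hy; omega
      simp [hix, h0, pvPhase]
    · have hxi : (decide (x ≤ i)) = true := by simp only [decide_eq_true_eq]; omega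
      match t with
      | [] =>
        have hc : (([x] : List Int).countP (fun x => decide (x ≤ i))) = 1 := by
          simp [List.countP_cons, hxi]
        simp [hix, hc, pvPhase]
      | y :: t2 =>
        rw [List.pairwise_cons] at hst
        obtain ⟨hy, hst2⟩ := hst
        have hxy : x < y := hx y (by simp)
        by_cases hiy : i < y
        · have h0 : ((y :: t2).countP (fun x => decide (x ≤ i))) = 0 := by
            rw [List.countP_eq_zero]
            intro z hz
            simp only [List.mem_cons] at hz
            simp only [decide_eq_true_eq]
            rcases hz with rfl | hz
            · omega
            · have := hy z hz; omega
          have hc : ((x :: y :: t2).countP (fun x => decide (x ≤ i))) = 1 := by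
            rw [List.countP_cons, h0, hxi]
            rfl
          have hlen : ¬ ((x :: y :: t2 : List Int).length = 1) := by simp
          simp [hix, hiy, hlen, hc, pvPhase]
        · have hyi : (decide (y ≤ i)) = true := by simp only [decide_eq_true_eq]; omega
          match t2 with
          | [] =>
            have hc : (([x, y] : List Int).countP (fun x => decide (x ≤ i))) = 2 := by
              simp [List.countP_cons, hxi, hyi]
            simp [hix, hiy, hc, pvPhase]
          | z :: t3 =>
            have hyz : y < z := hy z (by simp)
            by_cases hiz : i < z
            · have h0 : ((z :: t3).countP (fun x => decide (x ≤ i))) = 0 := by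
                rw [List.countP_eq_zero]
                intro w hw
                simp only [List.mem_cons] at hw
                simp only [decide_eq_true_eq]
                rcases hw with rfl | hw
                · omega
                · have := (List.pairwise_cons.1 hst2).1 w hw; omega
              have hc : ((x :: y :: z :: t3).countP (fun x => decide (x ≤ i))) = 2 := by
                rw [List.countP_cons, List.countP_cons, h0, hxi, hyi]
                rfl
              have hlen1 : ¬ ((x :: y :: z :: t3 : List Int).length = 1) := by simp
              have hlen2 : ¬ ((x :: y :: z :: t3 : List Int).length = 2) := by simp
              simp [hix, hiy, hiz, hlen1, hlen2, hc, pvPhase]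
            · have hzi : (decide (z ≤ i)) = true := by simp only [decide_eq_true_eq]; omega
              have hc3 : 3 ≤ ((x :: y :: z :: t3).countP (fun x => decide (x ≤ i))) := by
                simp [List.countP_cons, hxi, hyi, hzi]
              have hm : min ((x :: y :: z :: t3).countP (fun x => decide (x ≤ i))) 3 = 3 := by
                omega
              have hlen1 : ¬ ((x :: y :: z :: t3 : List Int).length = 1) := by simp
              have hlen2 : ¬ ((x :: y :: z :: t3 : List Int).length = 2) := by simp
              simp [hix, hiy, hiz, hlen1, hlen2, hm, pvPhase]

theorem pv_phase_char (l : List String) (i : Nat) (a : String)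
    (hga : l[i]? = some a) (hb : pvIsB a = false) :
    determine_phase_py (i : Int) l = pvPhase (min ((l.take i).countP pvIsB) 3) := by
  have hcount : ((pvB 0 l).countP (fun x => decide (x ≤ (i : Int)))) = (l.take i).countP pvIsB := by
    have h1 : ((pvB 0 l).countP (fun x => decide (x < (0 : Int) + ((i : Nat) + 1 : Nat)))) =
        (l.take (i + 1)).countP pvIsB := pvB_countP l 0 (i + 1)
    have h2 : ((pvB 0 l).countP (fun x => decide (x ≤ (i : Int)))) =
        ((pvB 0 l).countP (fun x => decide (x < (0 : Int) + ((i : Nat) + 1 : Nat)))) := by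
      apply List.countP_congr
      intro x _
      simp only [decide_eq_true_eq]
      push_cast
      omega
    have h3 : l.take (i + 1) = l.take i ++ [a] := by
      rw [List.take_add_one, hga]
      rfl
    rw [h2, h1, h3, List.countP_append, List.countP_cons, List.countP_nil, hb]
    simp
  rw [show determine_phase_py (i : Int) l =
      (if pvB 0 l = [] then "preflop"
       else if (i : Int) < (pvB 0 l).headD 0 then "preflop"
       else if (pvB 0 l).length = 1 ∨ (i : Int) < (pvB 0 l).getD 1 0 then "flop"
       else if (pvB 0 l).length = 2 ∨ (i : Int) < (pvB 0 l).getD 2 0 then "turn"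
       else "river") from rfl]
  rw [pvG (pvB 0 l) (i : Int) (pvB_sorted 0 l), hcount]

-- "d db"-actions and "p"-actions are disjoint (different first characters)
theorem pv_isB_not_isP (a : String) (h : pvIsB a = true) : pvIsP a = false := by
  unfold pvIsB at h
  unfold pvIsP
  simp only [PySem.Str.startswith_eq] at h ⊢
  rw [PySem.Chars.startswith_iff] at h
  by_contra hp
  rw [Bool.not_eq_false, PySem.Chars.startswith_iff] at hp
  obtain ⟨t1, ht1⟩ := h
  obtain ⟨t2, ht2⟩ := hp
  rw [← ht2] at ht1
  simp at ht1

-- pure if-algebra of the two loop bodies, with the atomic conditions abstracted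
theorem pv_ifs (d p : Bool) (Qa Ha Hb R1 R2 Sb : Prop)
    [Decidable Qa] [Decidable Ha] [Decidable Hb] [Decidable R1] [Decidable R2] [Decidable Sb]
    (hd : d = false) (hQ : Qa ↔ ¬ Sb) (hH : Hb ↔ ¬ Ha) (k : Nat) (c : Int) :
    (if d = true then (k + 1, c)
     else if p = true then (if Hb ∧ R1 ∧ R2 ∧ Sb then (k, c + 1) else (k, c)) else (k, c))
    = (k, if ¬ (p = true) then c else if Qa then c else if Ha then c
          else if R1 ∧ R2 then c + 1 else c) := by
  subst hd
  by_cases hp : p = true <;> by_cases h1 : Ha <;> by_cases h2 : R1 <;> by_cases h3 : R2 <;>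
    by_cases h4 : Sb <;> simp_all

-- per-element agreement of the two loop bodies on a non-board action
theorem pv_step_agree (hero_tag street : Option String) (past : List String)
    (i : Nat) (a : String) (k : Nat) (c : Int)
    (hga : past[i]? = some a) (hb : pvIsB a = false)
    (hk : k = (past.take i).countP pvIsB) :
    pvBstep hero_tag street (k, c) a = (k, pvAstep hero_tag street past c ((i : Int), a)) := by
  have hphase : determine_phase_py (i : Int) past = pvPhase (min k 3) := by
    rw [hk]; exact pv_phase_char past i a hga hb
  have hH : (hero_tag ≠ some ((PySem.Str.split₀ a).headD "")) ↔
      ¬ (some ((PySem.Str.split₀ a).headD "") = hero_tag) :=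
    ⟨fun h h2 => h h2.symm, fun h h2 => h h2.symm⟩
  unfold pvIsB at hb
  rcases street with _ | s
  · refine pv_ifs _ _ _ _ _ _ _ _ hb ?_ hH k c
    simp
  · refine pv_ifs _ _ _ _ _ _ _ _ hb ?_ hH k c
    have hg : (["preflop", "flop", "turn", "river"] : List String).getD (min k 3) "" =
        pvPhase (min k 3) := rfl
    simp only [hphase, hg]
    by_cases hst : pvPhase (min k 3) = s
    · simp [hst]
    · simp [hst]
      exact fun h => hst h.symm

-- main loop invariant: A's fold over the enumerated suffix equals B's fold with k = #board deals in the prefix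
theorem pv_main (hero_tag street : Option String) (past : List String) :
    ∀ (rest : List String) (i k : Nat) (c : Int),
    past.drop i = rest → k = (past.take i).countP pvIsB →
    (PySem.List.enumerate rest (i : Int)).foldl (pvAstep hero_tag street past) c =
      (rest.foldl (pvBstep hero_tag street) (k, c)).2 := by
  intro rest
  induction rest with
  | nil => intro i k c _ _; simp [PySem.List.enumerate_nil]
  | cons a t ih =>
    intro i k c hdrop hk
    have hga : past[i]? = some a := by
      have h0 : (past.drop i)[0]? = some a := by rw [hdrop]; rfl
      rwa [List.getElem?_drop, Nat.add_zero] at h0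
    have hdrop' : past.drop (i + 1) = t := by
      have h1 : (past.drop i).drop 1 = t := by rw [hdrop]; rfl
      rwa [List.drop_drop] at h1
    have htake : past.take (i + 1) = past.take i ++ [a] := by
      rw [List.take_add_one, hga]
      rfl
    have hcast : ((i : Int) + 1) = (((i + 1 : Nat) : Int)) := by push_cast; ring
    rw [PySem.List.enumerate_cons, List.foldl_cons, List.foldl_cons]
    by_cases hB : pvIsB a = true
    · have hP := pv_isB_not_isP a hB
      have hA : pvAstep hero_tag street past c ((i : Int), a) = c := by
        unfold pvAstep
        unfold pvIsP at hP
        simp at hP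
        simp [hP]
      have hBs : pvBstep hero_tag street (k, c) a = (k + 1, c) := by
        unfold pvBstep
        unfold pvIsB at hB
        simp at hB
        simp [hB]
      rw [hA, hBs, hcast]
      apply ih (i + 1) (k + 1) c hdrop'
      rw [htake, List.countP_append]
      simp [List.countP_cons, hB, hk]
    · rw [Bool.not_eq_true] at hB
      rw [pv_step_agree hero_tag street past i a k c hga hB hk, hcast]
      apply ih (i + 1) k _ hdrop'
      rw [htake, List.countP_append]
      simp [List.countP_cons, hB, hk]

-- ===== VERDICT (by name: the statement is the Claim_ definition above) =====
theorem count_opponent_raises_py_spec : Claim_equal_count_opponent_raises_py := by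
  intro past hero_tag street _
  unfold Spec_count_opponent_raises_py count_opponent_raises_py count_opponent_raises_py_alt
  have h := pv_main hero_tag street past past 0 0 0 (by simp) (by simp)
  simpa using h
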